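-- pv_equiv track=rewrite | github.com/LakeSuburbia/CodingGame | Puzzles/EASY/Python/ContainerTerminal.py | get_stacks
-- ===== SOURCE A (Python) =====
-- def get_stacks(line):
--     stacks = []
--     for char in line:
--         unplaced = True
--         memo = -1
--         for i, stack in enumerate(stacks):
--             if len(stack) <= 0:
--                 stack.append(char)
--                 unplaced = False
--             elif stack[-1] == char:
--                 stack.append(char)
--                 unplaced = False
--             elif stack[-1] > char:
--                 if memo == -1:
--                     memo = i
--                 elif stacks[memo][-1] > stack[-1]:
--                     memo = i
--         if unplaced:
--             if memo == -1:
--                 stacks.append([char])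
--             else:
--                 stacks[memo].append(char)
--     return len(stacks)
-- ===== SOURCE B (Python) =====
-- def get_stacks(line):
--     tops = []  # sorted distinct stack tops
--     for c in line:
--         lo, hi = 0, len(tops)
--         while lo < hi:
--             mid = (lo + hi) // 2
--             if tops[mid] < c:
--                 lo = mid + 1
--             else:
--                 hi = mid
--         if lo == len(tops):
--             tops.append(c)
--         elif tops[lo] != c:
--             tops[lo] = c
--     return len(tops)
-- ===== Notes on version B (the rewrite author's own statement) =====
-- stated objective: faster
-- what changed: B drops the list-of-stacks entirely: since only each stack's top matters and the tops stay distinct, it keeps one sorted list of tops and binary-searches (hand-written bisect) for the successor of each char, instead of A's full scan over all stacks with a memo of the best candidate.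
import Mathlib
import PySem

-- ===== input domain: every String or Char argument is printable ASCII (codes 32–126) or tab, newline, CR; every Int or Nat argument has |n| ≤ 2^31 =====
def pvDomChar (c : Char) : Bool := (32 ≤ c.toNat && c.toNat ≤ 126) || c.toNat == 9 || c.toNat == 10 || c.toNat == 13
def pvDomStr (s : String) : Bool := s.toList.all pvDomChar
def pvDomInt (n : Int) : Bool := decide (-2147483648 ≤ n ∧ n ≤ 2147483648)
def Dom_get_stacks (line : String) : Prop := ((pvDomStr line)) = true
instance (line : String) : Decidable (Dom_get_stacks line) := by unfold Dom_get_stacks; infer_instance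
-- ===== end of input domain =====

-- B replaces A's list of sts (scanned in full for every char, with a memo of the best
-- candidate) by a single sorted list of the distinct stack tops, binary-searched per char.

-- ===== PORT A =====

-- stack[-1]; the default is never read: every access is guarded by a nonemptiness test
def pvTop (s : List Char) : Char := s.getLast?.getD 'A'

-- body of `for i, stack in enumerate(sts)`, state (sts, unplaced, memo)
def innerA (c : Char) (acc : List (List Char) × Bool × Int) (i : Nat) :
    List (List Char) × Bool × Int :=
  let st := acc.1
  let stack := st.getD i []
  if stack.length ≤ 0 then (st.set i (stack ++ [c]), false, acc.2.2)
  else if pvTop stack = c then (st.set i (stack ++ [c]), false, acc.2.2)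
  else if c < pvTop stack then
    if acc.2.2 = -1 then (st, acc.2.1, (i : Int))
    else if pvTop stack < pvTop (st.getD acc.2.2.toNat []) then (st, acc.2.1, (i : Int))
    else (st, acc.2.1, acc.2.2)
  else (st, acc.2.1, acc.2.2)

-- body of `for char in line`
def stepA (sts : List (List Char)) (c : Char) : List (List Char) :=
  let r := (List.range sts.length).foldl (innerA c) (sts, true, (-1 : Int))
  if r.2.1 then
    if r.2.2 = -1 then r.1 ++ [[c]]
    else r.1.set r.2.2.toNat (r.1.getD r.2.2.toNat [] ++ [c])
  else r.1

def get_stacks (line : String) : Int :=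
  ((line.toList.foldl stepA []).length : Int)

-- ===== PORT B =====

-- the hand-written `while lo < hi` bisect loop of Source B
def bisect (tops : List Char) (c : Char) (lo hi : Nat) : Nat :=
  if h : lo < hi then
    let mid := (lo + hi) / 2
    if tops.getD mid 'A' < c then bisect tops c (mid + 1) hi
    else bisect tops c lo mid
  else lo
termination_by hi - lo
decreasing_by
  · omega
  · omega

-- body of `for c in line`
def stepB (tops : List Char) (c : Char) : List Char :=
  let lo := bisect tops c 0 tops.length
  if lo = tops.length then tops ++ [c]
  else if tops.getD lo 'A' ≠ c then tops.set lo c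
  else tops

def get_stacks_alt (line : String) : Int :=
  ((line.toList.foldl stepB []).length : Int)

-- ===== PRECONDITION & SPEC =====
def Spec_get_stacks (line : String) (out : Int) : Prop := out = get_stacks_alt line
instance (line : String) (out : Int) : Decidable (Spec_get_stacks line out) := by
  unfold Spec_get_stacks; infer_instance

-- ===== CLAIM (what is proved, stated in full; the proofs are below) =====
def Claim_equal_get_stacks : Prop := ∀ (line : String), Dom_get_stacks line → Spec_get_stacks line (get_stacks line)

-- ===== LEMMAS AND PROOFS =====

-- abbreviation used only in proofs: the top of stack j
def Tt (sts : List (List Char)) (j : Nat) : Char := pvTop (sts.getD j [])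

-- what A's memo means after scanning the first n sts
def MemoSpec (c : Char) (sts : List (List Char)) (n : Nat) (m : Int) : Prop :=
  (m = -1 ∧ ∀ j, j < n → ¬ c < Tt sts j) ∨
  (∃ j, j < n ∧ m = (j : Int) ∧ c < Tt sts j ∧
    ∀ k, k < n → c < Tt sts k → Tt sts j ≤ Tt sts k)

-- the invariant tying A's sts to B's sorted list of tops
def AB (sts : List (List Char)) (s : List Char) : Prop :=
  (∀ t ∈ sts, t ≠ []) ∧ (sts.map pvTop).Nodup ∧ s.Pairwise (· < ·) ∧
  (∀ x, x ∈ s ↔ x ∈ sts.map pvTop) ∧ s.length = sts.length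

lemma getD_ne_nil (sts : List (List Char)) (hne : ∀ t ∈ sts, t ≠ []) {n : Nat}
    (h : n < sts.length) : sts.getD n [] ≠ [] := by
  rw [List.getD_eq_getElem sts [] h]
  exact hne _ (List.getElem_mem h)

lemma foldA_nomem (c : Char) (sts : List (List Char))
    (hne : ∀ t ∈ sts, t ≠ []) :
    ∀ n, n ≤ sts.length → (∀ j, j < n → Tt sts j ≠ c) →
    ∃ m : Int, (List.range n).foldl (innerA c) (sts, true, (-1 : Int)) = (sts, true, m) ∧
      MemoSpec c sts n m := by
  intro n
  induction n with
  | zero =>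
    intro _ _
    exact ⟨-1, rfl, Or.inl ⟨rfl, by omega⟩⟩
  | succ n ih =>
    intro hn hnc
    obtain ⟨m, heq, hms⟩ := ih (by omega) (fun j hj => hnc j (by omega))
    rw [List.range_succ, List.foldl_append, heq]
    have hnn : n < sts.length := by omega
    have hstack : sts.getD n [] ≠ [] := getD_ne_nil sts hne hnn
    have hlen : ¬ (sts.getD n []).length ≤ 0 := by
      simpa [List.length_eq_zero_iff] using hstack
    have htc : pvTop (sts.getD n []) ≠ c := hnc n (by omega)
    have hstack' : sts[n]?.getD [] ≠ [] := by simpa [List.getD] using hstack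
    have htc' : pvTop (sts[n]?.getD []) ≠ c := by simpa [List.getD] using htc
    by_cases hlt : c < pvTop (sts.getD n [])
    · rcases hms with ⟨hm1, hall⟩ | ⟨j, hj, hmj, hcj, hmin⟩
      · refine ⟨(n : Int), ?_, Or.inr ⟨n, by omega, rfl, hlt, ?_⟩⟩
        · have hlt' : c < pvTop (sts[n]?.getD []) := by simpa [List.getD] using hlt
          simp [innerA, hstack', htc', hlt', hm1, Tt]
        · intro k hk hck
          rcases Nat.lt_succ_iff_lt_or_eq.mp hk with h | h
          · exact absurd hck (hall k h)
          · subst h; exact le_refl _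
      · have hmne : m ≠ -1 := by omega
        have hmt : m.toNat = j := by omega
        by_cases hcmp : pvTop (sts.getD n []) < pvTop (sts.getD m.toNat [])
        · refine ⟨(n : Int), ?_, Or.inr ⟨n, by omega, rfl, hlt, ?_⟩⟩
          · have hlt' : c < pvTop (sts[n]?.getD []) := by simpa [List.getD] using hlt
            have hcmp' : pvTop (sts[n]?.getD []) < pvTop (sts[m.toNat]?.getD []) := by
              simpa [List.getD] using hcmp
            simp [innerA, hstack', htc', hlt', hmne, hcmp', Tt]
          · intro k hk hck
            rcases Nat.lt_succ_iff_lt_or_eq.mp hk with h | h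
            · exact le_of_lt (lt_of_lt_of_le (by simpa [Tt, hmt] using hcmp) (hmin k h hck))
            · subst h; exact le_refl _
        · refine ⟨m, ?_, Or.inr ⟨j, by omega, hmj, hcj, ?_⟩⟩
          · have hlt' : c < pvTop (sts[n]?.getD []) := by simpa [List.getD] using hlt
            have hcmp' : ¬ pvTop (sts[n]?.getD []) < pvTop (sts[m.toNat]?.getD []) := by
              simpa [List.getD] using hcmp
            simp [innerA, hstack', htc', hlt', hmne, hcmp', Tt]
          · intro k hk hck
            rcases Nat.lt_succ_iff_lt_or_eq.mp hk with h | h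
            · exact hmin k h hck
            · subst h
              simpa [Tt, hmt] using le_of_not_gt hcmp
    · refine ⟨m, ?_, ?_⟩
      · have hlt' : ¬ c < pvTop (sts[n]?.getD []) := by simpa [List.getD] using hlt
        simp [innerA, hstack', htc', hlt', Tt]
      · rcases hms with ⟨hm1, hall⟩ | ⟨j, hj, hmj, hcj, hmin⟩
        · refine Or.inl ⟨hm1, ?_⟩
          intro k hk
          rcases Nat.lt_succ_iff_lt_or_eq.mp hk with h | h
          · exact hall k h
          · subst h; exact hlt
        · refine Or.inr ⟨j, by omega, hmj, hcj, ?_⟩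
          intro k hk hck
          rcases Nat.lt_succ_iff_lt_or_eq.mp hk with h | h
          · exact hmin k h hck
          · subst h; exact absurd hck hlt

lemma Tt_eq_get (sts : List (List Char)) {j : Nat} (h : j < sts.length) :
    Tt sts j = (sts.map pvTop)[j]'(by simpa using h) := by
  simp [Tt, List.getD, List.getElem?_eq_getElem h]

lemma Tt_ne (sts : List (List Char)) (hnd : (sts.map pvTop).Nodup) {j k : Nat}
    (hj : j < sts.length) (hk : k < sts.length) (hjk : j ≠ k) : Tt sts j ≠ Tt sts k := by
  rw [Tt_eq_get sts hj, Tt_eq_get sts hk]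
  rcases Nat.lt_or_lt_of_ne hjk with h | h
  · exact List.pairwise_iff_getElem.mp hnd j k (by simpa using hj) (by simpa using hk) h
  · exact fun he =>
      List.pairwise_iff_getElem.mp hnd k j (by simpa using hk) (by simpa using hj) h he.symm

lemma foldA_mem (c : Char) (sts : List (List Char))
    (hne : ∀ t ∈ sts, t ≠ []) (hnd : (sts.map pvTop).Nodup) :
    ∀ n, n ≤ sts.length → ∀ j, j < n → Tt sts j = c →
    ∃ m : Int, (List.range n).foldl (innerA c) (sts, true, (-1 : Int)) =
      (sts.set j (sts.getD j [] ++ [c]), false, m) := by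
  intro n
  induction n with
  | zero => omega
  | succ n ih =>
    intro hn j hj hjc
    have hjl : j < sts.length := by omega
    rcases Nat.lt_succ_iff_lt_or_eq.mp hj with hcase | hcase
    · -- the mutation happened before index n; index n leaves the state alone
      obtain ⟨m, heq⟩ := ih (by omega) j hcase hjc
      rw [List.range_succ, List.foldl_append, heq]
      have hnn : n < sts.length := by omega
      have hget : (sts.set j (sts[j]?.getD [] ++ [c]))[n]?.getD [] = sts[n]?.getD [] := by
        rw [List.getElem?_set_ne (by omega)]
      have hstack' : sts[n]?.getD [] ≠ [] := by
        simpa [List.getD] using getD_ne_nil sts hne hnn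
      have htc' : pvTop (sts[n]?.getD []) ≠ c := by
        have h1 : Tt sts n ≠ Tt sts j := Tt_ne sts hnd hnn hjl (by omega)
        rw [hjc] at h1
        simpa [Tt, List.getD] using h1
      by_cases hlt : c < pvTop (sts[n]?.getD [])
      · by_cases hm1 : m = -1
        · exact ⟨(n : Int), by simp [innerA, List.getD, hget, hstack', htc', hlt, hm1]⟩
        · by_cases hcmp : pvTop (sts[n]?.getD []) <
              pvTop ((sts.set j (sts[j]?.getD [] ++ [c]))[m.toNat]?.getD [])
          · exact ⟨(n : Int), by simp [innerA, hget, hstack', htc', hlt, hm1, hcmp]⟩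
          · exact ⟨m, by simp [innerA, hget, hstack', htc', hlt, hm1, hcmp]⟩
      · exact ⟨m, by simp [innerA, hget, hstack', htc', hlt]⟩
    · -- the mutation happens exactly at index n
      subst hcase
      have hprefix : ∀ k, k < j → Tt sts k ≠ c := by
        intro k hk
        rw [← hjc]
        exact Tt_ne sts hnd (by omega) hjl (by omega)
      obtain ⟨m, heq, _⟩ := foldA_nomem c sts hne j (by omega) hprefix
      rw [List.range_succ, List.foldl_append, heq]
      have hstack' : sts[j]?.getD [] ≠ [] := by
        simpa [List.getD] using getD_ne_nil sts hne hjl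
      have htc' : pvTop (sts[j]?.getD []) = c := by simpa [Tt, List.getD] using hjc
      exact ⟨m, by simp [innerA, hstack', htc', List.getD]⟩

-- membership in (map pvTop) through indices
lemma mem_tops_iff (sts : List (List Char)) (x : Char) :
    x ∈ sts.map pvTop ↔ ∃ j, ∃ h : j < sts.length, Tt sts j = x := by
  rw [List.mem_iff_getElem]
  constructor
  · rintro ⟨i, hi, he⟩
    refine ⟨i, by simpa using hi, ?_⟩
    rw [Tt_eq_get sts (by simpa using hi)]; exact he
  · rintro ⟨j, hj, he⟩
    refine ⟨j, by simpa using hj, ?_⟩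
    rw [← Tt_eq_get sts hj]; exact he

lemma getElem_ne_of_nodup (l : List Char) (hnd : l.Nodup) {i j : Nat} (hi : i < l.length)
    (hj : j < l.length) (hij : i ≠ j) : l[i] ≠ l[j] := by
  rcases Nat.lt_or_lt_of_ne hij with h | h
  · exact List.pairwise_iff_getElem.mp hnd i j hi hj h
  · exact fun he => List.pairwise_iff_getElem.mp hnd j i hj hi h he.symm

lemma mem_set_iff (l : List Char) (hnd : l.Nodup) {j : Nat} (hj : j < l.length) (a x : Char) :
    x ∈ l.set j a ↔ x = a ∨ (x ∈ l ∧ x ≠ l[j]) := by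
  constructor
  · intro hx
    obtain ⟨i, hi, he⟩ := List.mem_iff_getElem.mp hx
    have hi' : i < l.length := by simpa using hi
    rw [List.getElem_set] at he
    by_cases hij : j = i
    · simp [hij] at he
      exact Or.inl he.symm
    · simp [hij] at he
      subst he
      exact Or.inr ⟨List.getElem_mem hi', getElem_ne_of_nodup l hnd hi' hj fun h => hij h.symm⟩
  · rintro (rfl | ⟨hx, hne⟩)
    · exact List.mem_iff_getElem.mpr ⟨j, by simpa using hj, by simp⟩
    · obtain ⟨i, hi, he⟩ := List.mem_iff_getElem.mp hx
      have hij : j ≠ i := fun hcon => hne (by subst hcon; exact he.symm)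
      exact List.mem_iff_getElem.mpr ⟨i, by simpa using hi, by simp [hij, he]⟩

lemma nodup_set_notmem (l : List Char) (hnd : l.Nodup) {j : Nat} (hj : j < l.length) {a : Char}
    (ha : a ∉ l) : (l.set j a).Nodup := by
  refine List.pairwise_iff_getElem.mpr ?_
  intro i k hi hk hik
  have hi' : i < l.length := by simpa using hi
  have hk' : k < l.length := by simpa using hk
  rw [List.getElem_set, List.getElem_set]
  split_ifs with h1 h2
  · omega
  · exact fun hcon => ha (hcon ▸ List.getElem_mem hk')
  · exact fun hcon => ha (hcon ▸ List.getElem_mem hi')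
  · exact List.pairwise_iff_getElem.mp hnd i k hi' hk' hik

-- ===== the three shapes of A's outer-loop body =====

lemma stepA_mem (c : Char) (sts : List (List Char)) (hne : ∀ t ∈ sts, t ≠ [])
    (hnd : (sts.map pvTop).Nodup) {j : Nat} (hj : j < sts.length) (hjc : Tt sts j = c) :
    stepA sts c = sts.set j (sts.getD j [] ++ [c]) := by
  obtain ⟨m, heq⟩ := foldA_mem c sts hne hnd sts.length le_rfl j hj hjc
  unfold stepA
  rw [heq]
  simp

lemma stepA_app (c : Char) (sts : List (List Char)) (hne : ∀ t ∈ sts, t ≠ [])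
    (h1 : ∀ j, j < sts.length → Tt sts j ≠ c) (h2 : ∀ j, j < sts.length → ¬ c < Tt sts j) :
    stepA sts c = sts ++ [[c]] := by
  obtain ⟨m, heq, hms⟩ := foldA_nomem c sts hne sts.length le_rfl h1
  have hm : m = -1 := by
    rcases hms with ⟨hm, _⟩ | ⟨j, hj, _, hcj, _⟩
    · exact hm
    · exact absurd hcj (h2 j hj)
  unfold stepA
  rw [heq, hm]
  simp

lemma stepA_repl (c : Char) (sts : List (List Char)) (hne : ∀ t ∈ sts, t ≠ [])
    (h1 : ∀ j, j < sts.length → Tt sts j ≠ c) (h2 : ∃ j, j < sts.length ∧ c < Tt sts j) :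
    ∃ j, j < sts.length ∧ c < Tt sts j ∧ (∀ k, k < sts.length → c < Tt sts k → Tt sts j ≤ Tt sts k) ∧
      stepA sts c = sts.set j (sts.getD j [] ++ [c]) := by
  obtain ⟨m, heq, hms⟩ := foldA_nomem c sts hne sts.length le_rfl h1
  rcases hms with ⟨hm, hall⟩ | ⟨j, hj, hmj, hcj, hmin⟩
  · obtain ⟨j0, hj0, hc0⟩ := h2
    exact absurd hc0 (hall j0 hj0)
  · refine ⟨j, hj, hcj, hmin, ?_⟩
    unfold stepA
    rw [heq, hmj]
    simp

-- ===== B side: what the bisect loop finds =====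

lemma bisect_spec (tops : List Char) (c : Char) (hs : tops.Pairwise (· < ·)) :
    ∀ fuel lo hi, hi - lo ≤ fuel → hi ≤ tops.length → lo ≤ hi →
    (∀ i, i < lo → ∀ h : i < tops.length, tops[i] < c) →
    (∀ i, hi ≤ i → ∀ h : i < tops.length, ¬ tops[i] < c) →
    bisect tops c lo hi ≤ tops.length ∧
    (∀ i, i < bisect tops c lo hi → ∀ h : i < tops.length, tops[i] < c) ∧
    (∀ i, bisect tops c lo hi ≤ i → ∀ h : i < tops.length, ¬ tops[i] < c) := by
  intro fuel
  induction fuel with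
  | zero =>
    intro lo hi hf hh hlh hlow hhigh
    have : lo = hi := by omega
    subst this
    rw [bisect, dif_neg (lt_irrefl lo)]
    exact ⟨by omega, hlow, hhigh⟩
  | succ fuel ih =>
    intro lo hi hf hh hlh hlow hhigh
    rw [bisect]
    by_cases h : lo < hi
    · rw [dif_pos h]
      have hmid : (lo + hi) / 2 < tops.length := by omega
      have hgd : tops.getD ((lo + hi) / 2) 'A' = tops[(lo + hi) / 2] :=
        List.getD_eq_getElem tops 'A' hmid
      by_cases hc : tops.getD ((lo + hi) / 2) 'A' < c
      · rw [if_pos hc]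
        refine ih ((lo + hi) / 2 + 1) hi (by omega) hh (by omega) ?_ hhigh
        intro i hi' hil
        rcases Nat.lt_or_ge i ((lo + hi) / 2) with h' | h'
        · calc tops[i] < tops[(lo + hi) / 2] :=
                List.pairwise_iff_getElem.mp hs i _ hil hmid h'
            _ < c := by rw [← hgd]; exact hc
        · have : i = (lo + hi) / 2 := by omega
          subst this
          exact lt_of_eq_of_lt hgd.symm hc
      · rw [if_neg hc]
        refine ih lo ((lo + hi) / 2) (by omega) (by omega) (by omega) hlow ?_
        intro i hi' hil
        rcases Nat.lt_or_ge i hi with h' | h'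
        · rcases Nat.eq_or_lt_of_le hi' with h'' | h''
          · subst h''
            exact fun hcon => hc (lt_of_eq_of_lt hgd hcon)
          · intro hcon
            have h3 : tops[(lo + hi) / 2] < tops[i] :=
              List.pairwise_iff_getElem.mp hs _ i hmid hil h''
            rw [← hgd] at h3
            exact hc (lt_trans h3 hcon)
        · exact hhigh i h' hil
    · rw [dif_neg h]
      have : lo = hi := by omega
      subst this
      exact ⟨by omega, hlow, hhigh⟩

lemma bisect0 (s : List Char) (c : Char) (hs : s.Pairwise (· < ·)) :
    bisect s c 0 s.length ≤ s.length ∧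
    (∀ i, i < bisect s c 0 s.length → ∀ h : i < s.length, s[i] < c) ∧
    (∀ i, bisect s c 0 s.length ≤ i → ∀ h : i < s.length, ¬ s[i] < c) :=
  bisect_spec s c hs s.length 0 s.length (by omega) le_rfl (by omega)
    (by omega) (by intro i h1 h2; omega)

-- ===== the three shapes of B's loop body =====

lemma stepB_mem (c : Char) (s : List Char) (hs : s.Pairwise (· < ·)) (hc : c ∈ s) :
    stepB s c = s := by
  obtain ⟨hr1, hr2, hr3⟩ := bisect0 s c hs
  obtain ⟨i, hi, he⟩ := List.mem_iff_getElem.mp hc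
  have hir : bisect s c 0 s.length ≤ i := by
    by_contra hcon
    exact absurd (he ▸ hr2 i (by omega) hi) (lt_irrefl c)
  have hrl : bisect s c 0 s.length < s.length := by omega
  have hre : s[bisect s c 0 s.length] = c := by
    rcases Nat.eq_or_lt_of_le hir with h | h
    · subst h; exact he
    · have := List.pairwise_iff_getElem.mp hs _ i hrl hi h
      rw [he] at this
      exact absurd this (hr3 _ le_rfl hrl)
  unfold stepB
  rw [if_neg (by omega), if_neg (by simp [List.getD, List.getElem?_eq_getElem hrl, hre])]

lemma stepB_app (c : Char) (s : List Char) (hs : s.Pairwise (· < ·))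
    (h : ∀ t ∈ s, t < c) : stepB s c = s ++ [c] := by
  obtain ⟨hr1, hr2, hr3⟩ := bisect0 s c hs
  have hr : bisect s c 0 s.length = s.length := by
    rcases Nat.eq_or_lt_of_le hr1 with h' | h'
    · exact h'
    · exact absurd (h _ (List.getElem_mem h')) (hr3 _ le_rfl h')
  unfold stepB
  rw [if_pos hr]

lemma stepB_repl (c : Char) (s : List Char) (hs : s.Pairwise (· < ·)) (hc : c ∉ s)
    (h : ∃ t ∈ s, c < t) :
    ∃ r, ∃ hr : r < s.length, c < s[r] ∧ (∀ t ∈ s, c < t → s[r] ≤ t) ∧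
      (∀ i, i < r → ∀ h : i < s.length, s[i] < c) ∧ stepB s c = s.set r c := by
  obtain ⟨hr1, hr2, hr3⟩ := bisect0 s c hs
  obtain ⟨t, ht, hct⟩ := h
  obtain ⟨i, hi, he⟩ := List.mem_iff_getElem.mp ht
  have hrl : bisect s c 0 s.length < s.length := by
    rcases Nat.eq_or_lt_of_le hr1 with h' | h'
    · exact absurd (he ▸ hr2 i (by omega) hi) (not_lt_of_gt hct)
    · exact h'
  have hne : s[bisect s c 0 s.length] ≠ c := fun hcon => hc (hcon ▸ List.getElem_mem hrl)
  have hclt : c < s[bisect s c 0 s.length] :=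
    lt_of_le_of_ne (le_of_not_gt (hr3 _ le_rfl hrl)) (Ne.symm hne)
  refine ⟨bisect s c 0 s.length, hrl, hclt, ?_, hr2, ?_⟩
  · intro t' ht' hct'
    obtain ⟨k, hk, hek⟩ := List.mem_iff_getElem.mp ht'
    have hrk : bisect s c 0 s.length ≤ k := by
      by_contra hcon
      exact absurd (hek ▸ hr2 k (by omega) hk) (not_lt_of_gt hct')
    rcases Nat.eq_or_lt_of_le hrk with h' | h'
    · subst h'; exact le_of_eq hek
    · exact hek ▸ le_of_lt (List.pairwise_iff_getElem.mp hs _ k hrl hk h')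
  · unfold stepB
    rw [if_neg (by omega),
      if_pos (by simp [List.getD, List.getElem?_eq_getElem hrl]; exact hne)]

theorem main_inv (sts : List (List Char)) (s : List Char) (c : Char) (h : AB sts s) :
    AB (stepA sts c) (stepB s c) ∧ (stepB s c).length = (stepA sts c).length := by
  obtain ⟨hne, hnd, hsort, hmem, hlen⟩ := h
  have hsnd : s.Nodup := hsort.imp (fun hl => ne_of_lt hl)
  by_cases hcm : c ∈ sts.map pvTop
  · -- c is already a top: A appends onto that stack, B leaves its list alone
    obtain ⟨j, hj, hjc⟩ := (mem_tops_iff sts c).mp hcm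
    rw [stepA_mem c sts hne hnd hj hjc, stepB_mem c s hsort ((hmem c).mpr hcm)]
    have hmap : (sts.set j (sts.getD j [] ++ [c])).map pvTop = sts.map pvTop := by
      rw [List.map_set]
      have ht : pvTop (sts.getD j [] ++ [c]) = c := by simp [pvTop]
      have hjc' : (sts.map pvTop)[j]'(by simpa using hj) = c := by
        rw [← Tt_eq_get sts hj]; exact hjc
      rw [ht, ← hjc']
      exact List.set_getElem_self (by simpa using hj)
    refine ⟨⟨?_, by rw [hmap]; exact hnd, hsort, by rw [hmap]; exact hmem, by simpa using hlen⟩,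
      by simpa using hlen⟩
    intro t ht
    rcases List.mem_or_eq_of_mem_set ht with h' | h'
    · exact hne t h'
    · subst h'; simp
  · have h1 : ∀ k, k < sts.length → Tt sts k ≠ c := by
      intro k hk hcon
      exact hcm ((mem_tops_iff sts c).mpr ⟨k, hk, hcon⟩)
    have hcs : c ∉ s := fun hcon => hcm ((hmem c).mp hcon)
    by_cases hgt : ∃ j, j < sts.length ∧ c < Tt sts j
    · -- some top is above c: both replace the least such top by c
      obtain ⟨j, hj, hcj, hmin, heA⟩ := stepA_repl c sts hne h1 hgt
      have hex : ∃ t ∈ s, c < t := by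
        obtain ⟨j0, hj0, hc0⟩ := hgt
        exact ⟨Tt sts j0, (hmem _).mpr ((mem_tops_iff sts _).mpr ⟨j0, hj0, rfl⟩), hc0⟩
      obtain ⟨r, hr, hcr, hminB, hpre, heB⟩ := stepB_repl c s hsort hcs hex
      rw [heA, heB]
      have hTmem : Tt sts j ∈ s := (hmem _).mpr ((mem_tops_iff sts _).mpr ⟨j, hj, rfl⟩)
      have hsrT : s[r] ∈ sts.map pvTop := (hmem _).mp (List.getElem_mem hr)
      have hminA' : ∀ t ∈ sts.map pvTop, c < t → Tt sts j ≤ t := by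
        intro t ht hct
        obtain ⟨k, hk, hkt⟩ := (mem_tops_iff sts t).mp ht
        rw [← hkt]
        exact hmin k hk (by rw [hkt]; exact hct)
      have heqv : s[r] = Tt sts j :=
        le_antisymm (hminB _ hTmem hcj) (hminA' _ hsrT hcr)
      have hjm : j < (sts.map pvTop).length := by simpa using hj
      have hmapA : (sts.set j (sts.getD j [] ++ [c])).map pvTop = (sts.map pvTop).set j c := by
        rw [List.map_set]
        simp [pvTop]
      refine ⟨⟨?_, ?_, ?_, ?_, ?_⟩, ?_⟩
      · intro t ht
        rcases List.mem_or_eq_of_mem_set ht with h' | h'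
        · exact hne t h'
        · subst h'; simp
      · rw [hmapA]
        exact nodup_set_notmem _ hnd hjm hcm
      · refine List.pairwise_iff_getElem.mpr ?_
        intro i k hi hk hik
        have hi' : i < s.length := by simpa using hi
        have hk' : k < s.length := by simpa using hk
        rw [List.getElem_set, List.getElem_set]
        split_ifs with e1 e2
        · omega
        · exact lt_trans hcr (List.pairwise_iff_getElem.mp hsort r k hr hk' (by omega))
        · exact hpre i (by omega) hi'
        · exact List.pairwise_iff_getElem.mp hsort i k hi' hk' hik
      · intro x
        rw [hmapA, mem_set_iff s hsnd hr c x, mem_set_iff _ hnd hjm c x]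
        have hmj : (sts.map pvTop)[j]'hjm = Tt sts j := (Tt_eq_get sts hj).symm
        rw [hmj, ← heqv, hmem x]
      · simpa using hlen
      · simpa using hlen
    · -- every top is below c: both start a new stack
      have h2 : ∀ k, k < sts.length → ¬ c < Tt sts k := by
        intro k hk
        exact fun hcon => hgt ⟨k, hk, hcon⟩
      have hall : ∀ t ∈ s, t < c := by
        intro t ht
        obtain ⟨k, hk, hka⟩ := (mem_tops_iff sts t).mp ((hmem t).mp ht)
        have hx := h2 k hk
        have hne' := h1 k hk
        rw [hka] at hx hne'
        exact lt_of_le_of_ne (le_of_not_gt hx) hne'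
      rw [stepA_app c sts hne h1 h2, stepB_app c s hsort hall]
      have hmap : (sts ++ [[c]]).map pvTop = sts.map pvTop ++ [c] := by simp [pvTop]
      refine ⟨⟨?_, ?_, ?_, ?_, ?_⟩, ?_⟩
      · intro t ht
        rcases List.mem_append.mp ht with h' | h'
        · exact hne t h'
        · simp at h'; subst h'; simp
      · rw [hmap]
        simp [List.nodup_append, hnd]
        intro a ha hcon
        exact hcm (List.mem_map.mpr ⟨a, ha, hcon⟩)
      · refine List.pairwise_append.mpr ⟨hsort, by simp, ?_⟩
        intro a ha b hb
        simp at hb; subst hb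
        exact hall a ha
      · intro x
        rw [hmap]
        simp [hmem x]
      · simp [hlen]
      · simp [hlen]

-- ===== VERDICT =====
theorem get_stacks_spec : Claim_equal_get_stacks := by
  intro line _
  unfold Spec_get_stacks get_stacks get_stacks_alt
  suffices h : ∀ (l : List Char) (sts : List (List Char)) (s : List Char), AB sts s →
      (l.foldl stepB s).length = (l.foldl stepA sts).length by
    rw [h line.toList [] [] (by refine ⟨by simp, by simp, by simp, by simp, rfl⟩)]
  intro l
  induction l with
  | nil => intro sts s h; exact h.2.2.2.2
  | cons c l ih =>
    intro sts s h
    simpa using ih (stepA sts c) (stepB s c) (main_inv sts s c h).1
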